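-- pv_equiv track=rewrite | github.com/myoshi2891/Algorithm-DataStructures-Math-SQL | Algorithm/Binary Lifting/atcoder/B57/GPT/B57-Reduced-memory-version.py | solve
-- ===== SOURCE A (Python) =====
-- from typing import List
--
-- def sum_digits(x: int) -> int:
--     """桁和を計算する関数"""
--     s = 0
--     while x > 0:
--         s += x % 10
--         x //= 10
--     return s
--
-- def solve(N: int, K: int) -> List[int]:
--     """
--     ジャンプ表を1本だけにした省メモリ版
--     N: 初期整数の最大値
--     K: 操作回数
--     return: 各整数の最終値（1〜N）
--     """
--     # 1ステップ先を格納するジャンプ表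
--     jump = [0] * (N + 1)
--     for i in range(1, N + 1):
--         jump[i] = i - sum_digits(i)
--
--     # 各iの現在位置
--     cur = list(range(N + 1))
--
--     steps = K
--     while steps > 0:
--         # このビットが立っていれば適用
--         if steps & 1:
--             for i in range(1, N + 1):
--                 cur[i] = jump[cur[i]]
--
--         # ジャンプ表を2倍化
--         next_jump = [0] * (N + 1)
--         for i in range(1, N + 1):
--             next_jump[i] = jump[jump[i]]
--         jump = next_jump
--
--         steps >>= 1
--
--     return cur[1:]  # 1-index 部分だけ返す
-- ===== SOURCE B (Python) =====
-- from typing import List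
--
-- def solve(N: int, K: int) -> List[int]:
--     """O(N) version: the map i -> i - digitsum(i) is the parent pointer of a
--     tree rooted at 0; one iterative DFS with a path stack reads the K-th
--     ancestor (= K-fold image) of every node directly."""
--     if N < 0:
--         return []
--     k = K if K > 0 else 0  # applying the operation a non-positive number of times changes nothing
--     children = [[] for _ in range(N + 1)]
--     for i in range(1, N + 1):
--         s, x = 0, i
--         while x > 0:
--             s += x % 10
--             x //= 10
--         children[i - s].append(i)
--     res = [0] * (N + 1)
--     path = []
--     stack = [(0, False)]
--     while stack:
--         node, leaving = stack.pop()
--         if leaving: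
--             path.pop()
--         else:
--             path.append(node)
--             d = len(path) - 1  # depth of node
--             res[node] = path[d - k] if k <= d else 0
--             stack.append((node, True))
--             for c in reversed(children[node]):
--                 stack.append((c, False))
--     return res[1:]
-- ===== Notes on version B (the rewrite author's own statement) =====
-- stated objective: faster
-- what changed: A iterates the whole array once per bit of K with repeated squaring of a jump table (binary lifting); B builds the tree rooted at 0 whose parent map is i -> i - digitsum(i) and does one iterative DFS with an explicit path stack, reading each node's K-th ancestor (= the K-fold image) directly off the stack.
import Mathlib
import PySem

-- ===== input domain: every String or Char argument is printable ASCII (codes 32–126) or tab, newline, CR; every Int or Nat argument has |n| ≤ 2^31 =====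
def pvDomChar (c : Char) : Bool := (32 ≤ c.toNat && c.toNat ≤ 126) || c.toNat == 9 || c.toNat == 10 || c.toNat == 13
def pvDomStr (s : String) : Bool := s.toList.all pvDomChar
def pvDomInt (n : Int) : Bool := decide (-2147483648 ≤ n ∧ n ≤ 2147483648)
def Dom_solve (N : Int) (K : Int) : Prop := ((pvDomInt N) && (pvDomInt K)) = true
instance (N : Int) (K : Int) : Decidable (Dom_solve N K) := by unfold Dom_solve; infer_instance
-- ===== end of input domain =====

-- B replaces A's binary-lifting over jump tables by a single DFS of the tree
-- rooted at 0 whose parent map is i ↦ i - digitsum(i), reading the K-th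
-- ancestor off the DFS path stack: O(N) instead of O(N log K) (objective: faster).

-- ===== PORT A =====
-- while x > 0: s += x % 10; x //= 10   (accumulator s)
def sumDigitsGo (s x : Int) : Int :=
  if 0 < x then sumDigitsGo (s + PySem.Int.mod x 10) (PySem.Int.floordiv x 10) else s
termination_by x.toNat
decreasing_by
  have h : PySem.Int.floordiv x 10 = x / 10 := PySem.Int.floordiv_eq_ediv_of_pos (by omega)
  rw [h]; omega

def sum_digits (x : Int) : Int := sumDigitsGo 0 x

-- the 'while steps > 0' loop of A; all list writes are at indices 1..N, in range,
-- so pySetD/pyGetD are exact (Python never raises here)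
def solveLoop (N : Int) (jump cur : List Int) (steps : Int) : List Int :=
  if 0 < steps then
    let cur' := if PySem.Int.band steps 1 ≠ 0 then
        (PySem.List.pyRange 1 (N+1)).foldl
          (fun a i => PySem.List.pySetD a i (PySem.List.pyGetD jump (PySem.List.pyGetD a i 0) 0)) cur
      else cur
    let jump' := (PySem.List.pyRange 1 (N+1)).foldl
        (fun a i => PySem.List.pySetD a i (PySem.List.pyGetD jump (PySem.List.pyGetD jump i 0) 0))
        (List.replicate (N+1).toNat 0)
    solveLoop N jump' cur' (steps >>> (1:Nat))
  else cur
termination_by steps.toNat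
decreasing_by
  have h : steps >>> (1:Nat) = steps / (2:Int)^1 := by
    simpa using Int.shiftRight_eq_div_pow steps 1
  rw [h]; omega

def solve (N : Int) (K : Int) : List Int :=
  let jump := (PySem.List.pyRange 1 (N+1)).foldl
      (fun a i => PySem.List.pySetD a i (i - sum_digits i)) (List.replicate (N+1).toNat 0)
  let cur := PySem.List.pyRange 0 (N+1)
  PySem.List.slice (solveLoop N jump cur K) (some 1) none

-- ===== PORT B =====
-- B's inline digit-sum loop (s, x accumulators)
def digitSumGo (s x : Int) : Int :=
  if 0 < x then digitSumGo (s + PySem.Int.mod x 10) (PySem.Int.floordiv x 10) else s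
termination_by x.toNat
decreasing_by
  have h : PySem.Int.floordiv x 10 = x / 10 := PySem.Int.floordiv_eq_ediv_of_pos (by omega)
  rw [h]; omega

-- B's 'while stack' DFS loop.  The Lean stack/path lists keep Python's list END
-- at the HEAD for the stack (append/pop at the end = cons/head) and in natural
-- order for path (append = ++ [·], pop = dropLast).  children[i-s].append(i) is
-- ported as read-extend-write of the same entry.  fuel is a crude upper bound on
-- the number of loop iterations (2·#tree nodes ≤ 2·(N+2)^(N+2)); it is never
-- exhausted, the loop always ends by emptying the stack.
def dfsLoop (fuel : Nat) (children : List (List Int)) (k : Int)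
    (stack : List (Int × Bool)) (path : List Int) (res : List Int) : List Int :=
  match fuel, stack with
  | 0, _ => res
  | _ + 1, [] => res
  | fuel + 1, (node, leaving) :: st =>
    if leaving then dfsLoop fuel children k st path.dropLast res
    else
      let path' := path ++ [node]
      let d : Int := PySem.List.len path' - 1
      let v : Int := if k ≤ d then PySem.List.pyGetD path' (d - k) 0 else 0
      let res' := PySem.List.pySetD res node v
      let st' := (PySem.List.pyGetD children node []).reverse.foldl
          (fun s c => (c, false) :: s) ((node, true) :: st)
      dfsLoop fuel children k st' path' res'

def solve_alt (N : Int) (K : Int) : List Int :=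
  if N < 0 then []
  else
    let k := if 0 < K then K else 0
    let children := (PySem.List.pyRange 1 (N+1)).foldl
        (fun a i =>
          PySem.List.pySetD a (i - digitSumGo 0 i)
            (PySem.List.pyGetD a (i - digitSumGo 0 i) [] ++ [i]))
        (List.replicate (N+1).toNat ([] : List Int))
    let res : List Int := List.replicate (N+1).toNat 0
    PySem.List.slice
      (dfsLoop (2 * (N+2).toNat ^ (N+2).toNat) children k [((0:Int), false)] [] res)
      (some 1) none

-- ===== PRECONDITION & SPEC =====
def Spec_solve (N : Int) (K : Int) (out : List Int) : Prop := out = solve_alt N K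
instance (N : Int) (K : Int) (out : List Int) : Decidable (Spec_solve N K out) := by unfold Spec_solve; infer_instance

-- ===== CLAIM (what is proved, stated in full; the proofs are below) =====
def Claim_equal_solve : Prop := ∀ (N : Int) (K : Int), Dom_solve N K → Spec_solve N K (solve N K)


-- ===== LEMMAS AND PROOFS =====

-- ---------- arithmetic spec: digit sum and the step function on Nat ----------
def dsN (x : Nat) : Nat :=
  if x = 0 then 0 else x % 10 + dsN (x / 10)
termination_by x
decreasing_by omega

def stepF (i : Nat) : Nat := i - dsN i

lemma dsN_le (x : Nat) : dsN x ≤ x := by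
  induction x using Nat.strong_induction_on with
  | _ x ih =>
    rw [dsN]
    by_cases h : x = 0
    · simp [h]
    · have := ih (x / 10) (by omega)
      simp only [if_neg h]; omega

lemma dsN_pos (x : Nat) (h : 1 ≤ x) : 1 ≤ dsN x := by
  induction x using Nat.strong_induction_on with
  | _ x ih =>
    rw [dsN]
    simp only [if_neg (by omega : ¬ x = 0)]
    by_cases h10 : x < 10
    · omega
    · have := ih (x / 10) (by omega) (by omega)
      omega

lemma stepF_le (i : Nat) : stepF i ≤ i := by unfold stepF; omega

lemma stepF_lt (i : Nat) (h : 1 ≤ i) : stepF i < i := by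
  have := dsN_pos i h; unfold stepF; omega

lemma stepF_zero : stepF 0 = 0 := by unfold stepF; omega

lemma iter_zero (t : Nat) : stepF^[t] 0 = 0 := by
  induction t with
  | zero => rfl
  | succ t ih => rw [Function.iterate_succ_apply', ih, stepF_zero]

lemma iter_le (t i : Nat) : stepF^[t] i ≤ i := by
  induction t with
  | zero => simp
  | succ t ih =>
    rw [Function.iterate_succ_apply']
    exact le_trans (stepF_le _) ih

lemma iter_decay (t i : Nat) : stepF^[t] i = 0 ∨ stepF^[t] i + t ≤ i := by
  induction t with
  | zero => simp
  | succ t ih =>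
    rw [Function.iterate_succ_apply']
    rcases ih with h | h
    · left; rw [h, stepF_zero]
    · by_cases hz : stepF^[t] i = 0
      · left; rw [hz, stepF_zero]
      · right; have := stepF_lt (stepF^[t] i) (by omega); omega

lemma iter_self_zero (i : Nat) : stepF^[i] i = 0 := by
  rcases iter_decay i i with h | h
  · exact h
  · have := iter_le i i; omega

lemma iter_absorb (t i : Nat) (h : i ≤ t) : stepF^[t] i = 0 := by
  have : t = (t - i) + i := by omega
  rw [this, Function.iterate_add_apply, iter_self_zero, iter_zero]

-- ---------- ports of the digit-sum loops compute dsN ----------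
lemma sumDigitsGo_natCast : ∀ (m : Nat) (s : Int), sumDigitsGo s (m : Int) = s + (dsN m : Int) := by
  intro m
  induction m using Nat.strong_induction_on with
  | _ m ih =>
    intro s
    rw [sumDigitsGo]
    by_cases h : m = 0
    · subst h
      rw [if_neg (by norm_num), dsN]
      norm_num
    · rw [if_pos (by exact_mod_cast Nat.pos_of_ne_zero h)]
      rw [PySem.Int.mod_eq_emod_of_pos (by norm_num), PySem.Int.floordiv_eq_ediv_of_pos (by norm_num)]
      have h1 : ((m : Int)) / 10 = ((m / 10 : Nat) : Int) := by omega
      have h2 : ((m : Int)) % 10 = ((m % 10 : Nat) : Int) := by omega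
      rw [h1, h2, ih (m / 10) (by omega)]
      conv_rhs => rw [dsN]
      rw [if_neg h]
      push_cast
      ring

lemma digitSumGo_natCast : ∀ (m : Nat) (s : Int), digitSumGo s (m : Int) = s + (dsN m : Int) := by
  intro m
  induction m using Nat.strong_induction_on with
  | _ m ih =>
    intro s
    rw [digitSumGo]
    by_cases h : m = 0
    · subst h
      rw [if_neg (by norm_num), dsN]
      norm_num
    · rw [if_pos (by exact_mod_cast Nat.pos_of_ne_zero h)]
      rw [PySem.Int.mod_eq_emod_of_pos (by norm_num), PySem.Int.floordiv_eq_ediv_of_pos (by norm_num)]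
      have h1 : ((m : Int)) / 10 = ((m / 10 : Nat) : Int) := by omega
      have h2 : ((m : Int)) % 10 = ((m % 10 : Nat) : Int) := by omega
      rw [h1, h2, ih (m / 10) (by omega)]
      conv_rhs => rw [dsN]
      rw [if_neg h]
      push_cast
      ring

-- ---------- generic characterisation of A's write-each-index folds ----------
lemma set_map_range {α : Type} (L s : Nat) (g : Nat → α) (v : α) :
    ((List.range L).map g).set s v
      = (List.range L).map (fun j => if j = s then v else g j) := by
  apply List.ext_getElem
  · simp
  · intro j h1 h2
    simp only [List.getElem_set, List.getElem_map, List.getElem_range]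
    simp only [List.length_set, List.length_map, List.length_range] at h1
    split_ifs with hsj hjs hjs
    · rfl
    · omega
    · omega
    · rfl

lemma fold_set_window (upd : Int → Int → Int) (L : Nat) :
    ∀ (t s : Nat) (g : Nat → Int), L ≤ s + t →
    ((PySem.List.pyRange (s : Int) (L : Int)).foldl
        (fun l i => PySem.List.pySetD l i (upd i (PySem.List.pyGetD l i 0)))
        ((List.range L).map g))
      = (List.range L).map (fun j => if s ≤ j then upd (j : Int) (g j) else g j) := by
  intro t
  induction t with
  | zero =>
    intro s g hL
    rw [PySem.List.pyRange_one_eq_nil (by exact_mod_cast hL)]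
    simp only [List.foldl_nil]
    apply List.map_congr_left
    intro j hj
    rw [List.mem_range] at hj
    rw [if_neg (by omega)]
  | succ t ih =>
    intro s g hL
    by_cases hsL : L ≤ s
    · rw [PySem.List.pyRange_one_eq_nil (by exact_mod_cast hsL)]
      simp only [List.foldl_nil]
      apply List.map_congr_left
      intro j hj
      rw [List.mem_range] at hj
      rw [if_neg (by omega)]
    · have hsL' : s < L := by omega
      rw [PySem.List.pyRange_one_cons (by exact_mod_cast hsL')]
      rw [List.foldl_cons]
      have hget : PySem.List.pyGetD ((List.range L).map g) ((s : Nat) : Int) 0 = g s := by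
        rw [PySem.List.pyGetD_natCast]
        exact PySem.List.getD_map_range _ _ _ _ hsL'
      rw [hget, PySem.List.pySetD_natCast, set_map_range]
      have hc : ((s : Int) + 1) = (((s + 1 : Nat)) : Int) := by push_cast; ring
      rw [hc, ih (s+1) _ (by omega)]
      apply List.map_congr_left
      intro j hj
      rw [List.mem_range] at hj
      by_cases h1 : j = s
      · rw [if_neg (show ¬ (s + 1 ≤ j) by omega), if_pos h1, if_pos (show s ≤ j by omega), h1]
      · by_cases h2 : s + 1 ≤ j
        · rw [if_pos h2, if_neg h1, if_pos (show s ≤ j by omega)]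
        · rw [if_neg h2, if_neg h1, if_neg (show ¬ s ≤ j by omega)]

-- ---------- the jump arrays of A ----------
def jarr (L : Nat) (f : Nat → Nat) : List Int := (List.range L).map (fun j => ((f j : Nat) : Int))

lemma jarr_getD (L : Nat) (f : Nat → Nat) (m : Nat) (h : m < L) :
    PySem.List.pyGetD (jarr L f) ((m : Nat) : Int) 0 = ((f m : Nat) : Int) := by
  rw [PySem.List.pyGetD_natCast]
  exact PySem.List.getD_map_range _ _ _ _ h

-- one doubling / one application round of A, on represented arrays
lemma apply_round (n : Nat) (fj fc : Nat → Nat)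
    (hfc : ∀ j, j ≤ n → fc j ≤ j) (hfc0 : fc 0 = 0) (hfj0 : fj 0 = 0) :
    ((PySem.List.pyRange 1 ((n : Int) + 1)).foldl
        (fun a i => PySem.List.pySetD a i
          (PySem.List.pyGetD (jarr (n+1) fj) (PySem.List.pyGetD a i 0) 0))
        (jarr (n+1) fc))
      = jarr (n+1) (fun j => fj (fc j)) := by
  have h := fold_set_window (fun _ v => PySem.List.pyGetD (jarr (n+1) fj) v 0) (n+1) n 1
      (fun j => ((fc j : Nat) : Int)) (by omega)
  push_cast at h
  rw [show jarr (n+1) fc = (List.range (n+1)).map (fun j => ((fc j : Nat) : Int)) from rfl, h,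
    show jarr (n+1) (fun j => fj (fc j)) = (List.range (n+1)).map (fun j => ((fj (fc j) : Nat) : Int)) from rfl]
  apply List.map_congr_left
  intro j hj
  rw [List.mem_range] at hj
  by_cases h1 : 1 ≤ j
  · rw [if_pos h1]
    rw [show PySem.List.pyGetD (jarr (n+1) fj) ((fc j : Nat) : Int) 0 = ((fj (fc j) : Nat) : Int) from
      jarr_getD (n+1) fj (fc j) (by have := hfc j (by omega); omega)]
  · rw [if_neg h1]
    have hj0 : j = 0 := by omega
    simp [hj0, hfc0, hfj0]


lemma replicate_eq_map (L : Nat) : List.replicate L (0 : Int) = (List.range L).map (fun _ => (0 : Int)) := by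
  apply List.ext_getElem
  · simp
  · intro i h1 h2
    simp

lemma double_round (n : Nat) (fj : Nat → Nat) (hfj : ∀ j, j ≤ n → fj j ≤ j) (hfj0 : fj 0 = 0) :
    ((PySem.List.pyRange 1 ((n : Int) + 1)).foldl
        (fun a i => PySem.List.pySetD a i
          (PySem.List.pyGetD (jarr (n+1) fj) (PySem.List.pyGetD (jarr (n+1) fj) i 0) 0))
        (List.replicate ((n : Int) + 1).toNat 0))
      = jarr (n+1) (fun j => fj (fj j)) := by
  have h := fold_set_window
      (fun i _ => PySem.List.pyGetD (jarr (n+1) fj) (PySem.List.pyGetD (jarr (n+1) fj) i 0) 0)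
      (n+1) n 1 (fun _ => (0 : Int)) (by omega)
  push_cast at h
  rw [show ((n : Int) + 1).toNat = n + 1 from by omega, replicate_eq_map, h,
    show jarr (n+1) (fun j => fj (fj j)) = (List.range (n+1)).map (fun j => ((fj (fj j) : Nat) : Int)) from rfl]
  apply List.map_congr_left
  intro j hj
  rw [List.mem_range] at hj
  by_cases h1 : 1 ≤ j
  · rw [if_pos h1]
    rw [show PySem.List.pyGetD (jarr (n+1) fj) ((j : Nat) : Int) 0 = ((fj j : Nat) : Int) from
      jarr_getD _ _ _ (by omega)]
    rw [show PySem.List.pyGetD (jarr (n+1) fj) ((fj j : Nat) : Int) 0 = ((fj (fj j) : Nat) : Int) from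
      jarr_getD _ _ _ (by have := hfj j (by omega); omega)]
  · rw [if_neg h1]
    have hj0 : j = 0 := by omega
    simp [hj0, hfj0]

lemma build_jump (n : Nat) :
    ((PySem.List.pyRange 1 ((n : Int) + 1)).foldl
        (fun a i => PySem.List.pySetD a i (i - sum_digits i))
        (List.replicate ((n : Int) + 1).toNat 0))
      = jarr (n+1) (fun j => stepF^[1] j) := by
  have h := fold_set_window (fun i _ => i - sum_digits i) (n+1) n 1 (fun _ => (0 : Int)) (by omega)
  push_cast at h
  rw [show ((n : Int) + 1).toNat = n + 1 from by omega, replicate_eq_map, h,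
    show jarr (n+1) (fun j => stepF^[1] j) = (List.range (n+1)).map (fun j => ((stepF^[1] j : Nat) : Int)) from rfl]
  apply List.map_congr_left
  intro j hj
  rw [List.mem_range] at hj
  rw [Function.iterate_one]
  by_cases h1 : 1 ≤ j
  · rw [if_pos h1]
    unfold sum_digits
    rw [sumDigitsGo_natCast j 0]
    unfold stepF
    have := dsN_le j
    omega
  · rw [if_neg h1]
    have hj0 : j = 0 := by omega
    simp [hj0, stepF_zero]

lemma loop_eq (n : Nat) : ∀ (t : Nat) (steps : Int), steps.toNat ≤ t → ∀ (m e : Nat),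
    solveLoop (n : Int) (jarr (n+1) (fun j => stepF^[m] j)) (jarr (n+1) (fun j => stepF^[e] j)) steps
      = jarr (n+1) (fun j => stepF^[e + m * steps.toNat] j) := by
  intro t
  induction t with
  | zero =>
    intro steps hst m e
    rw [solveLoop, if_neg (by omega)]
    rw [show steps.toNat = 0 from by omega]
    norm_num
  | succ t ih =>
    intro steps hst m e
    by_cases hpos : 0 < steps
    · rw [solveLoop, if_pos hpos]
      dsimp only
      have hs : steps >>> (1 : Nat) = steps / 2 := by
        simpa using Int.shiftRight_eq_div_pow steps 1
      have hband : PySem.Int.band steps 1 = steps % 2 := by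
        rw [PySem.Int.band_one, PySem.Int.mod_eq_emod_of_pos (by norm_num)]
      rw [hband]
      rw [double_round n (fun j => stepF^[m] j) (fun j _ => iter_le m j) (iter_zero m)]
      rw [show (fun j => stepF^[m] (stepF^[m] j)) = (fun j => stepF^[m+m] j) from
        funext fun j => (Function.iterate_add_apply _ _ _ _).symm]
      by_cases hodd : steps % 2 = 0
      · rw [hodd, if_neg (by norm_num)]
        rw [ih (steps >>> (1:Nat)) (by rw [hs]; omega) (m+m) e]
        have hu : steps.toNat = 2 * (steps >>> (1:Nat)).toNat := by rw [hs]; omega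
        rw [show e + (m+m) * (steps >>> (1:Nat)).toNat = e + m * steps.toNat from by
          rw [hu]; ring]
      · have hodd1 : steps % 2 = 1 := by omega
        rw [hodd1, if_pos (by norm_num)]
        rw [apply_round n (fun j => stepF^[m] j) (fun j => stepF^[e] j)
          (fun j _ => iter_le e j) (iter_zero e) (iter_zero m)]
        rw [show (fun j => stepF^[m] (stepF^[e] j)) = (fun j => stepF^[m+e] j) from
          funext fun j => (Function.iterate_add_apply _ _ _ _).symm]
        rw [ih (steps >>> (1:Nat)) (by rw [hs]; omega) (m+m) (m+e)]
        have hu : steps.toNat = 2 * (steps >>> (1:Nat)).toNat + 1 := by rw [hs]; omega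
        rw [show (m+e) + (m+m) * (steps >>> (1:Nat)).toNat = e + m * steps.toNat from by
          rw [hu]; ring]
    · rw [solveLoop, if_neg hpos]
      rw [show steps.toNat = 0 from by omega]
      norm_num

lemma loop_nil (N : Int) (hN : N < 0) : ∀ (t : Nat) (steps : Int), steps.toNat ≤ t →
    solveLoop N [] [] steps = [] := by
  intro t
  induction t with
  | zero =>
    intro steps hst
    rw [solveLoop, if_neg (by omega)]
  | succ t ih =>
    intro steps hst
    by_cases hpos : 0 < steps
    · rw [solveLoop, if_pos hpos]
      dsimp only
      rw [PySem.List.pyRange_one_eq_nil (by omega)]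
      simp only [List.foldl_nil]
      rw [show (N+1).toNat = 0 from by omega, show List.replicate 0 (0:Int) = [] from rfl, ite_self]
      have hs : steps >>> (1 : Nat) = steps / 2 := by
        simpa using Int.shiftRight_eq_div_pow steps 1
      exact ih (steps >>> (1:Nat)) (by rw [hs]; omega)
    · rw [solveLoop, if_neg hpos]

lemma solve_eq (N K : Int) :
    solve N K = if N < 0 then []
      else (List.range N.toNat).map (fun j => ((stepF^[K.toNat] (j+1) : Nat) : Int)) := by
  by_cases hN : N < 0
  · rw [if_pos hN]
    unfold solve
    dsimp only
    rw [PySem.List.pyRange_one_eq_nil (by omega), PySem.List.pyRange_one_eq_nil (by omega)]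
    simp only [List.foldl_nil]
    rw [show (N+1).toNat = 0 from by omega, show List.replicate 0 (0:Int) = [] from rfl]
    rw [loop_nil N hN K.toNat K (le_refl _)]
    rfl
  · rw [if_neg hN]
    unfold solve
    dsimp only
    obtain ⟨n, rfl⟩ : ∃ n : Nat, N = (n : Int) := ⟨N.toNat, by omega⟩
    rw [build_jump n]
    have hcur : PySem.List.pyRange 0 ((n : Int) + 1) = jarr (n+1) (fun j => stepF^[0] j) := by
      rw [show ((n : Int) + 1) = (((n+1 : Nat)) : Int) from by push_cast; ring,
        PySem.List.pyRange_zero_nat]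
      simp [jarr]
    rw [hcur, loop_eq n K.toNat K (le_refl _) 1 0,
      show 0 + 1 * K.toNat = K.toNat from by omega]
    rw [PySem.List.slice_from (jarr (n+1) (fun j => stepF^[K.toNat] j)) (by norm_num : (0:Int) ≤ 1)]
    rw [show Int.toNat (n : Int) = n from Int.toNat_natCast n]
    unfold jarr
    rw [List.range_succ_eq_map]
    simp only [List.map_cons, List.map_map]
    apply List.map_congr_left
    intro j hj
    simp [Function.comp]

-- ---------- B: the children table ----------
def childF (n j : Nat) : List Nat := (List.range' 1 n).filter (fun i => stepF i == j)

def chL (n : Nat) : List (List Int) :=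
  (List.range (n+1)).map (fun j => (childF n j).map (fun i => ((i : Nat) : Int)))

lemma mem_childF {n j c : Nat} : c ∈ childF n j ↔ 1 ≤ c ∧ c ≤ n ∧ stepF c = j := by
  unfold childF
  simp only [List.mem_filter, List.mem_range'_1, beq_iff_eq]
  omega

lemma childF_empty {n j : Nat} (h : n < j) : childF n j = [] := by
  unfold childF
  rw [List.filter_eq_nil_iff]
  intro c hc
  have hc' := List.mem_range'_1.mp hc
  have := stepF_le c
  simp only [beq_iff_eq]
  omega

lemma children_fold (n : Nat) :
    ∀ (t s : Nat) (g : Nat → List Int), 1 ≤ s → n + 1 ≤ s + t →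
    ((PySem.List.pyRange (s : Int) ((n : Int) + 1)).foldl
        (fun a i => PySem.List.pySetD a (i - digitSumGo 0 i)
          (PySem.List.pyGetD a (i - digitSumGo 0 i) [] ++ [i]))
        ((List.range (n+1)).map g))
      = (List.range (n+1)).map
          (fun j => g j ++ ((List.range' s (n + 1 - s)).filter (fun i => stepF i == j)).map
            (fun i => ((i : Nat) : Int))) := by
  intro t
  induction t with
  | zero =>
    intro s g hs hL
    rw [PySem.List.pyRange_one_eq_nil (by omega : (n : Int) + 1 ≤ (s : Int))]
    simp only [List.foldl_nil]
    apply List.map_congr_left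
    intro j hj
    rw [show n + 1 - s = 0 from by omega]
    simp
  | succ t ih =>
    intro s g hs hL
    by_cases hsL : n + 1 ≤ s
    · rw [PySem.List.pyRange_one_eq_nil (by omega : (n : Int) + 1 ≤ (s : Int))]
      simp only [List.foldl_nil]
      apply List.map_congr_left
      intro j hj
      rw [show n + 1 - s = 0 from by omega]
      simp
    · have hslt : s < n + 1 := by omega
      rw [PySem.List.pyRange_one_cons (by omega : (s : Int) < (n : Int) + 1)]
      rw [List.foldl_cons]
      have hds : ((s : Int) - digitSumGo 0 (s : Int)) = ((stepF s : Nat) : Int) := by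
        rw [digitSumGo_natCast s 0]
        unfold stepF
        have := dsN_le s
        omega
      rw [hds]
      have hget : PySem.List.pyGetD ((List.range (n+1)).map g) ((stepF s : Nat) : Int) []
          = g (stepF s) := by
        rw [PySem.List.pyGetD_natCast]
        exact PySem.List.getD_map_range _ _ _ _ (by have := stepF_le s; omega)
      rw [hget, PySem.List.pySetD_natCast, set_map_range]
      rw [show ((s : Int) + 1) = (((s + 1 : Nat)) : Int) from by push_cast; ring]
      rw [ih (s+1) _ (by omega) (by omega)]
      apply List.map_congr_left
      intro j hj
      rw [List.mem_range] at hj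
      rw [show n + 1 - s = (n - s) + 1 from by omega, List.range'_succ]
      rw [show n + 1 - (s + 1) = n - s from by omega]
      rw [List.filter_cons]
      by_cases hsf : stepF s = j
      · rw [if_pos hsf.symm, if_pos (by simpa using hsf)]
        simp [hsf, List.append_assoc]
      · rw [if_neg (fun h => hsf h.symm), if_neg (by simpa using hsf)]

-- ---------- B: subtree sizes and the recursive mirror of the DFS loop ----------
def szF (n j : Nat) : Nat :=
  1 + ((childF n j).attach.map (fun c => szF n c.1)).sum
termination_by n + 1 - j
decreasing_by
  have hm := mem_childF.mp c.2
  have := stepF_lt c.1 hm.1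
  omega

lemma szF_pos (n j : Nat) : 1 ≤ szF n j := by unfold szF; omega

lemma szF_child_le {n j c : Nat} (hc : c ∈ childF n j) : szF n c ≤ szF n j - 1 := by
  conv_rhs => rw [szF]
  have h1 : szF n c ∈ (childF n j).attach.map (fun c => szF n c.1) :=
    List.mem_map.mpr ⟨⟨c, hc⟩, List.mem_attach _ _, rfl⟩
  have := List.single_le_sum (fun x _ => Nat.zero_le x) _ h1
  omega

lemma szF_le_pow (n : Nat) : ∀ (d j : Nat), n + 1 - j ≤ d → szF n j ≤ (n+2) ^ (n + 1 - j) := by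
  intro d
  induction d with
  | zero =>
    intro j h
    rw [szF, childF_empty (by omega), show n + 1 - j = 0 from by omega]
    simp
  | succ d ih =>
    intro j h
    by_cases hj : n + 1 ≤ j
    · rw [szF, childF_empty (by omega), show n + 1 - j = 0 from by omega]
      simp
    · have hjn : j ≤ n := by omega
      rw [szF, List.attach_map_val]
      have hb : ∀ x ∈ (childF n j).map (szF n), x ≤ (n+2) ^ (n - j) := by
        intro x hx
        rw [List.mem_map] at hx
        obtain ⟨c, hc, rfl⟩ := hx
        obtain ⟨hc1, hcn, hcf⟩ := mem_childF.mp hc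
        have hjc : j < c := by have := stepF_lt c hc1; omega
        calc szF n c ≤ (n+2) ^ (n + 1 - c) := ih c (by omega)
          _ ≤ (n+2) ^ (n - j) := Nat.pow_le_pow_right (by omega) (by omega)
      have hsum := List.sum_le_card_nsmul _ _ hb
      rw [smul_eq_mul] at hsum
      have hlen : ((childF n j).map (szF n)).length ≤ n := by
        rw [List.length_map]
        calc (childF n j).length ≤ (List.range' 1 n).length := List.length_filter_le _ _
          _ = n := by simp
      have h2 : ((childF n j).map (szF n)).length * ((n+2) ^ (n - j)) ≤ n * ((n+2) ^ (n - j)) :=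
        Nat.mul_le_mul_right _ hlen
      have hX : 1 ≤ (n+2) ^ (n - j) := Nat.one_le_pow _ _ (by omega)
      rw [show n + 1 - j = (n - j) + 1 from by omega, pow_succ]
      have hA : 1 + ((childF n j).map (szF n)).sum ≤ 1 + n * ((n+2) ^ (n - j)) :=
        Nat.add_le_add_left (le_trans hsum h2) 1
      have hB : 1 + n * ((n+2) ^ (n - j)) ≤ (n+2) ^ (n - j) * (n + 2) := by nlinarith [hX]
      exact le_trans hA hB

def dfsR (n : Nat) (k : Int) (node : Nat) (path : List Int) (res : List Int) : List Int :=
  let path' := path ++ [((node : Nat) : Int)]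
  let d : Int := PySem.List.len path' - 1
  let v : Int := if k ≤ d then PySem.List.pyGetD path' (d - k) 0 else 0
  let res1 := PySem.List.pySetD res ((node : Nat) : Int) v
  (childF n node).attach.foldl (fun r c => dfsR n k c.1 path' r) res1
termination_by n + 1 - node
decreasing_by
  have hm := mem_childF.mp c.2
  have := stepF_lt c.1 hm.1
  omega

lemma foldl_attach_gen {α β : Type} (g : β → α → β) :
    ∀ (cs : List α) (r : β), cs.attach.foldl (fun acc c => g acc c.1) r = cs.foldl g r := by
  intro cs
  induction cs with
  | nil => intro r; rfl
  | cons a l ih =>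
    intro r
    rw [List.attach_cons, List.foldl_cons, List.foldl_map]
    exact ih (g r a)

lemma foldl_attach_dfsR (n : Nat) (k : Int) (path' : List Int) (cs : List Nat) (r : List Int) :
    cs.attach.foldl (fun acc c => dfsR n k c.1 path' acc) r
      = cs.foldl (fun acc c => dfsR n k c path' acc) r :=
  foldl_attach_gen (fun acc x => dfsR n k x path' acc) cs r

lemma chL_getD {n node : Nat} (h : node ≤ n) :
    PySem.List.pyGetD (chL n) ((node : Nat) : Int) [] = (childF n node).map (fun i => ((i : Nat) : Int)) := by
  rw [PySem.List.pyGetD_natCast]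
  exact PySem.List.getD_map_range _ _ _ _ (by omega)

lemma push_rev (cs : List Int) (S : List (Int × Bool)) :
    cs.reverse.foldl (fun s c => (c, false) :: s) S = cs.map (fun c => (c, false)) ++ S := by
  induction cs generalizing S with
  | nil => rfl
  | cons c cs ih =>
    rw [List.reverse_cons, List.foldl_append]
    simp only [List.foldl_cons, List.foldl_nil, List.map_cons, List.cons_append]
    rw [ih]

lemma dfsLoop_nil (f : Nat) (ch : List (List Int)) (k : Int) (p r : List Int) :
    dfsLoop f ch k [] p r = r := by
  cases f <;> rfl

lemma dfsLoop_step_false (fuel : Nat) (ch : List (List Int)) (k : Int) (node : Int)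
    (st : List (Int × Bool)) (path res : List Int) :
    dfsLoop (fuel + 1) ch k ((node, false) :: st) path res =
      (let path' := path ++ [node]
       let d : Int := PySem.List.len path' - 1
       let v : Int := if k ≤ d then PySem.List.pyGetD path' (d - k) 0 else 0
       let res' := PySem.List.pySetD res node v
       let st' := (PySem.List.pyGetD ch node []).reverse.foldl
          (fun s c => (c, false) :: s) ((node, true) :: st)
       dfsLoop fuel ch k st' path' res') := rfl

lemma dfsLoop_step_true (fuel : Nat) (ch : List (List Int)) (k : Int) (node : Int)
    (st : List (Int × Bool)) (path res : List Int) :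
    dfsLoop (fuel + 1) ch k ((node, true) :: st) path res =
      dfsLoop fuel ch k st path.dropLast res := rfl

lemma run_children (n : Nat) (k : Int) (m : Nat)
    (ih : ∀ node, szF n node ≤ m → node ≤ n → ∀ st path res f,
      dfsLoop (2 * szF n node + f) (chL n) k ((((node : Nat) : Int), false) :: st) path res
        = dfsLoop f (chL n) k st path (dfsR n k node path res)) :
    ∀ (cs : List Nat), (∀ c ∈ cs, szF n c ≤ m ∧ c ≤ n) →
    ∀ (st : List (Int × Bool)) (path res : List Int) (f : Nat),
    dfsLoop ((cs.map (fun c => 2 * szF n c)).sum + f) (chL n) k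
        (cs.map (fun c => (((c : Nat) : Int), false)) ++ st) path res
      = dfsLoop f (chL n) k st path (cs.foldl (fun r c => dfsR n k c path r) res) := by
  intro cs
  induction cs with
  | nil =>
    intro _ st path res f
    simp
  | cons c cs ihcs =>
    intro hcs st path res f
    simp only [List.map_cons, List.sum_cons, List.cons_append, List.foldl_cons]
    rw [show 2 * szF n c + (cs.map (fun c => 2 * szF n c)).sum + f
        = 2 * szF n c + ((cs.map (fun c => 2 * szF n c)).sum + f) from by omega]
    rw [ih c (hcs c (by simp)).1 (hcs c (by simp)).2]
    exact ihcs (fun c' hc' => hcs c' (by simp [hc'])) st path _ f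

lemma run_bridge (n : Nat) (k : Int) : ∀ (m : Nat) (node : Nat), szF n node ≤ m → node ≤ n →
    ∀ (st : List (Int × Bool)) (path res : List Int) (f : Nat),
    dfsLoop (2 * szF n node + f) (chL n) k ((((node : Nat) : Int), false) :: st) path res
      = dfsLoop f (chL n) k st path (dfsR n k node path res) := by
  intro m
  induction m with
  | zero =>
    intro node hsz
    exact absurd hsz (by have := szF_pos n node; omega)
  | succ m ih =>
    intro node hsz hn st path res f
    have hpos := szF_pos n node
    have hsum : szF n node = 1 + ((childF n node).map (szF n)).sum := by
      rw [szF, List.attach_map_val]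
    obtain ⟨f1, hf1⟩ : ∃ f1, 2 * szF n node + f = f1 + 1 :=
      ⟨2 * szF n node + f - 1, by omega⟩
    rw [hf1, dfsLoop_step_false]
    dsimp only
    rw [chL_getD hn, push_rev, List.map_map]
    rw [show ((fun c => (c, false)) ∘ fun i : Nat => ((i : Nat) : Int))
        = (fun c : Nat => (((c : Nat) : Int), false)) from rfl]
    rw [show f1 = ((childF n node).map (fun c => 2 * szF n c)).sum + (1 + f) from by
      have h2 : ((childF n node).map (fun c => 2 * szF n c)).sum
          = 2 * ((childF n node).map (szF n)).sum := List.sum_map_mul_left _ _ _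
      omega]
    rw [run_children n k m ih (childF n node)
      (fun c hc => ⟨by have := szF_child_le hc; omega, (mem_childF.mp hc).2.1⟩) _ _ _ _]
    rw [show (1 + f) = f + 1 from by omega, dfsLoop_step_true, List.dropLast_concat]
    rw [dfsR]
    rw [foldl_attach_dfsR]

-- ---------- B: what dfsR writes ----------
def subb (node j : Nat) : Bool := (List.range (j+1)).any (fun t => stepF^[t] j == node)

lemma subb_iff_ex {node j : Nat} : subb node j = true ↔ ∃ t, stepF^[t] j = node := by
  unfold subb
  simp only [List.any_eq_true, List.mem_range, beq_iff_eq]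
  constructor
  · rintro ⟨t, _, ht⟩; exact ⟨t, ht⟩
  · rintro ⟨t, ht⟩
    by_cases h : t ≤ j
    · exact ⟨t, by omega, ht⟩
    · exact ⟨j, by omega, by rw [iter_self_zero]; rw [iter_absorb t j (by omega)] at ht; exact ht⟩

lemma sub_decomp {n node j : Nat} (hj : j ≤ n) :
    (∃ t, stepF^[t] j = node) ↔ (j = node ∨ ∃ c ∈ childF n node, ∃ t, stepF^[t] j = c) := by
  constructor
  · rintro ⟨t, ht⟩
    by_cases h0 : j = node
    · exact Or.inl h0
    · right
      have hex : ∃ u, stepF^[u] j = node := ⟨t, ht⟩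
      obtain ⟨t1, h10⟩ : ∃ t1, Nat.find hex = t1 + 1 := by
        refine ⟨Nat.find hex - 1, ?_⟩
        have hspec := Nat.find_spec hex
        rcases Nat.eq_zero_or_pos (Nat.find hex) with hz | hp
        · exfalso; apply h0; rw [hz] at hspec; simpa using hspec
        · omega
      have hspec := Nat.find_spec hex
      rw [h10, Function.iterate_succ_apply'] at hspec
      have hmin : ¬ stepF^[t1] j = node := Nat.find_min hex (by omega)
      have hc1 : 1 ≤ stepF^[t1] j := by
        rcases Nat.eq_zero_or_pos (stepF^[t1] j) with hz | hp
        · exfalso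
          apply hmin
          rw [hz] at hspec
          rw [stepF_zero] at hspec
          rw [hz]
          exact hspec
        · exact hp
      exact ⟨stepF^[t1] j, mem_childF.mpr ⟨hc1, le_trans (iter_le t1 j) hj, hspec⟩, t1, rfl⟩
  · rintro (rfl | ⟨c, hc, t, ht⟩)
    · exact ⟨0, rfl⟩
    · have hcf := (mem_childF.mp hc).2.2
      exact ⟨t+1, by rw [Function.iterate_succ_apply', ht, hcf]⟩

def GoodP (node : Nat) (p : List Int) : Prop :=
  1 ≤ p.length ∧ p[0]? = some 0 ∧
    ∀ t, t < p.length → p[p.length - 1 - t]? = some ((stepF^[t] node : Nat) : Int)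

lemma goodP_child {node c : Nat} {p : List Int} (hg : GoodP node p) (hc : stepF c = node) :
    GoodP c (p ++ [((c : Nat) : Int)]) := by
  obtain ⟨hl, h0, hts⟩ := hg
  refine ⟨by simp, ?_, ?_⟩
  · rw [List.getElem?_append_left (by omega)]
    exact h0
  · intro t ht
    rw [List.length_append] at ht
    simp only [List.length_cons, List.length_nil] at ht
    cases t with
    | zero =>
      rw [show (p ++ [((c : Nat) : Int)]).length - 1 - 0 = p.length from by simp]
      rw [List.getElem?_concat_length]
      simp
    | succ t' =>
      have ht' : t' < p.length := by omega
      rw [show (p ++ [((c : Nat) : Int)]).length - 1 - (t' + 1) = p.length - 1 - t' from by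
        simp; omega]
      rw [List.getElem?_append_left (by omega)]
      rw [hts t' ht']
      rw [show stepF^[t' + 1] c = stepF^[t'] node from by rw [Function.iterate_succ_apply, hc]]

lemma dfsR_fold_entries (n : Nat) (k : Int) (m : Nat)
    (ih : ∀ node, szF n node ≤ m → node ≤ n → ∀ path res, res.length = n + 1 →
      GoodP node (path ++ [((node : Nat) : Int)]) →
      (dfsR n k node path res).length = n + 1 ∧
      ∀ j, j ≤ n → (dfsR n k node path res)[j]? =
        if subb node j then some ((stepF^[k.toNat] j : Nat) : Int) else res[j]?) :
    ∀ (cs : List Nat) (path' : List Int),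
    (∀ c ∈ cs, szF n c ≤ m ∧ c ≤ n ∧ GoodP c (path' ++ [((c : Nat) : Int)])) →
    ∀ res, res.length = n + 1 →
    (cs.foldl (fun r c => dfsR n k c path' r) res).length = n + 1 ∧
    ∀ j, j ≤ n → (cs.foldl (fun r c => dfsR n k c path' r) res)[j]? =
      if cs.any (fun c => subb c j) then some ((stepF^[k.toNat] j : Nat) : Int) else res[j]? := by
  intro cs
  induction cs with
  | nil =>
    intro path' _ res hres
    refine ⟨by simpa using hres, ?_⟩
    intro j hj
    simp
  | cons c cs ihcs =>
    intro path' hcs res hres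
    obtain ⟨hc1, hc2, hc3⟩ := hcs c (by simp)
    have h1 := ih c hc1 hc2 path' res hres hc3
    have h2 := ihcs path' (fun c' hc' => hcs c' (by simp [hc'])) (dfsR n k c path' res) h1.1
    simp only [List.foldl_cons]
    refine ⟨h2.1, ?_⟩
    intro j hj
    rw [h2.2 j hj, List.any_cons]
    by_cases ha : cs.any (fun c => subb c j) = true
    · rw [if_pos ha, if_pos (show (subb c j || cs.any (fun c => subb c j)) = true by
        rw [ha, Bool.or_true])]
    · have ha' : cs.any (fun c => subb c j) = false := by
        simpa using ha
      rw [if_neg ha, h1.2 j hj]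
      by_cases hb : subb c j = true
      · rw [if_pos hb, if_pos (by rw [hb, Bool.true_or])]
      · have hb' : subb c j = false := by simpa using hb
        rw [if_neg hb, if_neg (by rw [hb', ha']; simp)]

lemma dfsR_entries (n : Nat) (k : Int) (hk : 0 ≤ k) :
    ∀ (m node : Nat), szF n node ≤ m → node ≤ n →
    ∀ (path : List Int) (res : List Int), res.length = n + 1 →
    GoodP node (path ++ [((node : Nat) : Int)]) →
    (dfsR n k node path res).length = n + 1 ∧
    ∀ j, j ≤ n → (dfsR n k node path res)[j]? =
      if subb node j then some ((stepF^[k.toNat] j : Nat) : Int) else res[j]? := by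
  intro m
  induction m with
  | zero =>
    intro node hsz
    exact absurd hsz (by have := szF_pos n node; omega)
  | succ m ih =>
    intro node hsz hn path res hres hgood
    have hpos := szF_pos n node
    have hlenp : (path ++ [((node : Nat) : Int)]).length = path.length + 1 := by simp
    obtain ⟨hg1, hg2, hg3⟩ := hgood
    have hv : (if k ≤ PySem.List.len (path ++ [((node : Nat) : Int)]) - 1
        then PySem.List.pyGetD (path ++ [((node : Nat) : Int)])
          ((PySem.List.len (path ++ [((node : Nat) : Int)]) - 1) - k) 0
        else 0) = ((stepF^[k.toNat] node : Nat) : Int) := by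
      rw [PySem.List.len_eq, hlenp]
      by_cases hkd : k ≤ ((path.length : Nat) : Int) + 1 - 1
      · rw [if_pos (by push_cast; omega)]
        have hidx : (((path.length + 1 : Nat) : Int) - 1 - k)
            = ((path.length - k.toNat : Nat) : Int) := by push_cast; omega
        rw [hidx, PySem.List.pyGetD_natCast]
        have hidx2 := hg3 k.toNat (by omega)
        rw [hlenp, show path.length + 1 - 1 - k.toNat = path.length - k.toNat from by omega]
          at hidx2
        rw [List.getD_eq_getElem?_getD, hidx2]
        rfl
      · rw [if_neg (by push_cast at hkd ⊢; omega)]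
        have hfloor : stepF^[path.length] node = 0 := by
          have h1 := hg3 path.length (by omega)
          rw [hlenp, show path.length + 1 - 1 - path.length = 0 from by omega, hg2] at h1
          have h2 := Option.some.inj h1
          omega
        rw [show k.toNat = (k.toNat - path.length) + path.length from by omega,
          Function.iterate_add_apply, hfloor, iter_zero]
        simp
    rw [dfsR]
    rw [foldl_attach_dfsR, hv, PySem.List.pySetD_natCast]
    have hfold := dfsR_fold_entries n k m ih (childF n node) (path ++ [((node : Nat) : Int)])
      (fun c hc => ⟨by have := szF_child_le hc; omega, (mem_childF.mp hc).2.1,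
        goodP_child ⟨hg1, hg2, hg3⟩ (mem_childF.mp hc).2.2⟩)
      (res.set node ((stepF^[k.toNat] node : Nat) : Int)) (by rw [List.length_set, hres])
    refine ⟨hfold.1, ?_⟩
    intro j hj
    rw [hfold.2 j hj]
    have hset : (res.set node ((stepF^[k.toNat] node : Nat) : Int))[j]? =
        if j = node then some ((stepF^[k.toNat] j : Nat) : Int) else res[j]? := by
      by_cases hjn' : j = node
      · subst hjn'
        rw [if_pos rfl, List.getElem?_set_self (by omega)]
      · rw [if_neg hjn', List.getElem?_set_ne (fun h => hjn' h.symm)]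
    rw [hset]
    have hdec : (subb node j = true) ↔
        (j = node ∨ (childF n node).any (fun c => subb c j) = true) := by
      rw [subb_iff_ex, sub_decomp (n := n) hj]
      constructor
      · rintro (h | ⟨c, hc, t, ht⟩)
        · exact Or.inl h
        · exact Or.inr (List.any_eq_true.mpr ⟨c, hc, subb_iff_ex.mpr ⟨t, ht⟩⟩)
      · rintro (h | h)
        · exact Or.inl h
        · obtain ⟨c, hc, hcs⟩ := List.any_eq_true.mp h
          exact Or.inr ⟨c, hc, subb_iff_ex.mp hcs⟩
    by_cases hA : (childF n node).any (fun c => subb c j) = true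
    · rw [if_pos hA, if_pos (hdec.mpr (Or.inr hA))]
    · rw [if_neg hA]
      by_cases hB : j = node
      · rw [if_pos hB, if_pos (hdec.mpr (Or.inl hB))]
      · rw [if_neg hB, if_neg (fun h => by
          rcases hdec.mp h with h' | h'
          · exact hB h'
          · exact hA h')]

lemma solve_alt_eq (N K : Int) :
    solve_alt N K = if N < 0 then []
      else (List.range N.toNat).map (fun j => ((stepF^[K.toNat] (j+1) : Nat) : Int)) := by
  by_cases hN : N < 0
  · rw [if_pos hN]
    unfold solve_alt
    rw [if_pos hN]
  · rw [if_neg hN]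
    unfold solve_alt
    rw [if_neg hN]
    dsimp only
    obtain ⟨n, rfl⟩ : ∃ n : Nat, N = (n : Int) := ⟨N.toNat, by omega⟩
    rw [show ((n : Int) + 1).toNat = n + 1 from by omega,
      show ((n : Int) + 2).toNat = n + 2 from by omega]
    have hch : ((PySem.List.pyRange 1 ((n : Int) + 1)).foldl
        (fun a i => PySem.List.pySetD a (i - digitSumGo 0 i)
          (PySem.List.pyGetD a (i - digitSumGo 0 i) [] ++ [i]))
        (List.replicate (n + 1) ([] : List Int))) = chL n := by
      have hrep : List.replicate (n + 1) ([] : List Int)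
          = (List.range (n + 1)).map (fun _ => ([] : List Int)) := by
        apply List.ext_getElem <;> simp
      rw [hrep]
      have h := children_fold n n 1 (fun _ => ([] : List Int)) (le_refl 1) (by omega)
      push_cast at h
      rw [h]
      unfold chL childF
      apply List.map_congr_left
      intro j hj
      simp
    rw [hch]
    set k : Int := if 0 < K then K else 0 with hkdef
    have hk0 : 0 ≤ k := by rw [hkdef]; split_ifs <;> omega
    have hkK : k.toNat = K.toNat := by rw [hkdef]; split_ifs <;> omega
    have hsz : szF n 0 ≤ (n+2) ^ (n+2) := by
      calc szF n 0 ≤ (n+2) ^ (n + 1 - 0) := szF_le_pow n (n+1) 0 (by omega)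
        _ ≤ (n+2) ^ (n+2) := Nat.pow_le_pow_right (by omega) (by omega)
    rw [show 2 * (n+2) ^ (n+2) = 2 * szF n 0 + (2 * (n+2) ^ (n+2) - 2 * szF n 0) from by omega]
    have hrun := run_bridge n k (szF n 0) 0 (le_refl _) (Nat.zero_le n) [] []
      (List.replicate (n + 1) (0 : Int)) (2 * (n+2) ^ (n+2) - 2 * szF n 0)
    norm_num at hrun
    rw [hrun, dfsLoop_nil]
    have hgood : GoodP 0 (([] : List Int) ++ [((0 : Nat) : Int)]) := by
      refine ⟨by simp, by simp, ?_⟩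
      intro t ht
      simp only [List.nil_append, List.length_cons, List.length_nil] at ht
      rw [show t = 0 from by omega]
      simp
    have hE := dfsR_entries n k hk0 (szF n 0) 0 (le_refl _) (Nat.zero_le n) []
      (List.replicate (n + 1) 0) (by simp) hgood
    have hfin : dfsR n k 0 [] (List.replicate (n + 1) (0 : Int))
        = (List.range (n + 1)).map (fun j => ((stepF^[k.toNat] j : Nat) : Int)) := by
      apply List.ext_getElem?
      intro i
      by_cases hi : i ≤ n
      · rw [hE.2 i hi, if_pos (subb_iff_ex.mpr ⟨i, iter_self_zero i⟩)]
        rw [List.getElem?_map, List.getElem?_range (by omega)]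
        rfl
      · rw [List.getElem?_eq_none (by rw [hE.1]; omega),
          List.getElem?_eq_none (by simp; omega)]
    rw [hfin, PySem.List.slice_from _ (by norm_num : (0:Int) ≤ 1)]
    rw [show Int.toNat (n : Int) = n from Int.toNat_natCast n, hkK]
    rw [List.range_succ_eq_map]
    simp only [List.map_cons, List.map_map]
    rw [show Int.toNat 1 = 1 from rfl, List.drop_succ_cons, List.drop_zero]
    apply List.map_congr_left
    intro j hj
    simp [Function.comp]

-- ===== VERDICT (by name: the statement is the Claim_ definition above) =====
theorem solve_spec : Claim_equal_solve := by
  intro N K _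
  unfold Spec_solve
  rw [solve_eq, solve_alt_eq]
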